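-- pv_equiv track=rewrite | github.com/annieshenca/HackerRank | Interview Preparation Kit/Recursion and Backtracking/Recursion- Davis Staircase.py | stepPerms2
-- ===== SOURCE A (Python) =====
-- def stepPerms2(n):
--     memo = dict()
--     memo[0] = 1
--     memo[1] = 2
--     memo[2] = 4
--     for i in range(3, n+1):
--         memo[i] = memo[i-1] + memo[i-2] + memo[i-3]
--     return memo[n-1]
-- ===== SOURCE B (Python) =====
-- def stepPerms2(n):
--     # Tribonacci via 3x3 matrix exponentiation by squaring: O(log n) matrix
--     # multiplications instead of A's O(n) dict-filling loop.
--     def mul(x, y):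
--         return (
--             x[0]*y[0] + x[1]*y[3] + x[2]*y[6],
--             x[0]*y[1] + x[1]*y[4] + x[2]*y[7],
--             x[0]*y[2] + x[1]*y[5] + x[2]*y[8],
--             x[3]*y[0] + x[4]*y[3] + x[5]*y[6],
--             x[3]*y[1] + x[4]*y[4] + x[5]*y[7],
--             x[3]*y[2] + x[4]*y[5] + x[5]*y[8],
--             x[6]*y[0] + x[7]*y[3] + x[8]*y[6],
--             x[6]*y[1] + x[7]*y[4] + x[8]*y[7],
--             x[6]*y[2] + x[7]*y[5] + x[8]*y[8],
--         )
--     r = (1, 0, 0, 0, 1, 0, 0, 0, 1)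
--     b = (1, 1, 1, 1, 0, 0, 0, 1, 0)
--     k = n - 1
--     while k > 0:
--         if k % 2 == 1:
--             r = mul(r, b)
--         b = mul(b, b)
--         k //= 2
--     # bottom row of r applied to the seed vector (4, 2, 1)
--     return r[6]*4 + r[7]*2 + r[8]
-- ===== Notes on version B (the rewrite author's own statement) =====
-- stated objective: faster
-- what changed: Replaces A's O(n) dict-filling tribonacci loop by 3x3 matrix exponentiation with squaring, O(log n) multiplications.
-- outside the precondition, e.g. on stepPerms2(0): A raises KeyError, B returns 1
import Mathlib
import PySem

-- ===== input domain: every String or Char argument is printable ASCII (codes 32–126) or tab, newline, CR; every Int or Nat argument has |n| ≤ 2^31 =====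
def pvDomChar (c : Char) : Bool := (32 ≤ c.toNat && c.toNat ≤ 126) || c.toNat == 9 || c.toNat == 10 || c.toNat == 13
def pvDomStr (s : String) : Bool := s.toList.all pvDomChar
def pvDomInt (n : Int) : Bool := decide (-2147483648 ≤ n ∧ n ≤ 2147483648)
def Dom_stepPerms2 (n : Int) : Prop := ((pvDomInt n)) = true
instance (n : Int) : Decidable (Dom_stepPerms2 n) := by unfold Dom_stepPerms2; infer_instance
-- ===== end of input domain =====

-- B replaces A's O(n) memo-dict loop by 3x3 matrix exponentiation by squaring (O(log n) multiplications).

-- ===== PORT A =====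
-- memo[i-1]/memo[i-2]/memo[i-3] inside the loop always exist (i ≥ 3), so getD is exact there;
-- the final memo[n-1] raises KeyError for n ≤ 0 — excluded by Pre_ (get? is none there).
def stepPerms2 (n : Int) : Int :=
  let memo : PySem.Dict Int Int := (((PySem.Dict.empty).insert 0 1).insert 1 2).insert 2 4
  let memo := (PySem.List.pyRange 3 (n+1) 1).foldl
      (fun d i => d.insert i (d.getD (i-1) 0 + d.getD (i-2) 0 + d.getD (i-3) 0)) memo
  (memo.get? (n-1)).getD 0

-- ===== PORT B =====
-- Source B's 9-tuples become a 9-field structure; mul is transcribed entrywise.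
structure Mat3 where
  a : Int
  b : Int
  c : Int
  d : Int
  e : Int
  f : Int
  g : Int
  h : Int
  i : Int
deriving DecidableEq, Repr

def matMul (x y : Mat3) : Mat3 :=
  ⟨x.a*y.a + x.b*y.d + x.c*y.g,
   x.a*y.b + x.b*y.e + x.c*y.h,
   x.a*y.c + x.b*y.f + x.c*y.i,
   x.d*y.a + x.e*y.d + x.f*y.g,
   x.d*y.b + x.e*y.e + x.f*y.h,
   x.d*y.c + x.e*y.f + x.f*y.i,
   x.g*y.a + x.h*y.d + x.i*y.g,
   x.g*y.b + x.h*y.e + x.i*y.h,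
   x.g*y.c + x.h*y.f + x.i*y.i⟩

-- the while-loop of Source B (k //= 2 on a positive k is Lean's Int division)
def powLoop (r b : Mat3) (k : Int) : Mat3 :=
  if h : 0 < k then
    powLoop (if k % 2 == 1 then matMul r b else r) (matMul b b) (k / 2)
  else r
termination_by k.toNat
decreasing_by omega

def stepPerms2_alt (n : Int) : Int :=
  let r := powLoop ⟨1,0,0,0,1,0,0,0,1⟩ ⟨1,1,1,1,0,0,0,1,0⟩ (n - 1)
  r.g*4 + r.h*2 + r.i

-- ===== PRECONDITION & SPEC =====
-- A raises KeyError for n ≤ 0 (memo[n-1] never set); Pre_ excludes exactly those inputs.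
def Pre_stepPerms2 (n : Int) : Prop := 1 ≤ n
instance (n : Int) : Decidable (Pre_stepPerms2 n) := by unfold Pre_stepPerms2; infer_instance
def pvWitness_stepPerms2 : Int := 5

def Spec_stepPerms2 (n : Int) (out : Int) : Prop := out = stepPerms2_alt n
instance (n : Int) (out : Int) : Decidable (Spec_stepPerms2 n out) := by unfold Spec_stepPerms2; infer_instance

-- ===== CLAIM (what is proved, stated in full; the proofs are below) =====
def Claim_equal_stepPerms2 : Prop := ∀ (n : Int), Dom_stepPerms2 n → Pre_stepPerms2 n → Spec_stepPerms2 n (stepPerms2 n)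

-- ===== LEMMAS AND PROOFS =====

-- the tribonacci sequence both programs compute: trib k = number of ways to climb k+1 steps
def trib : Nat → Int
  | 0 => 1
  | 1 => 2
  | 2 => 4
  | k+3 => trib (k+2) + trib (k+1) + trib k

def matI : Mat3 := ⟨1,0,0,0,1,0,0,0,1⟩
def matM : Mat3 := ⟨1,1,1,1,0,0,0,1,0⟩

def mpow (m : Mat3) : Nat → Mat3
  | 0 => matI
  | k+1 => matMul m (mpow m k)

theorem matMul_assoc (x y z : Mat3) : matMul (matMul x y) z = matMul x (matMul y z) := by
  cases x; cases y; cases z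
  simp only [matMul, Mat3.mk.injEq]
  and_intros <;> ring

theorem matMul_one (x : Mat3) : matMul x matI = x := by
  cases x; simp only [matMul, matI, Mat3.mk.injEq]; and_intros <;> ring

theorem one_matMul (x : Mat3) : matMul matI x = x := by
  cases x; simp only [matMul, matI, Mat3.mk.injEq]; and_intros <;> ring

theorem mpow_sq (m : Mat3) (j : Nat) : mpow (matMul m m) j = mpow m (2*j) := by
  induction j with
  | zero => rfl
  | succ j ih =>
    have h2 : 2*(j+1) = (2*j)+1+1 := by ring
    rw [h2]
    show matMul (matMul m m) (mpow (matMul m m) j) = mpow m (2*j+1+1)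
    rw [ih]
    show _ = matMul m (matMul m (mpow m (2*j)))
    rw [← matMul_assoc]

theorem powLoop_eq_aux (K : Nat) : ∀ (k : Int), k.toNat ≤ K → ∀ r b,
    powLoop r b k = matMul r (mpow b k.toNat) := by
  induction K with
  | zero =>
    intro k hk r b
    have h : ¬ 0 < k := by omega
    rw [powLoop, dif_neg h]
    have h0 : k.toNat = 0 := by omega
    rw [h0]
    exact (matMul_one r).symm
  | succ K ih =>
    intro k hk r b
    by_cases h : 0 < k
    · rw [powLoop, dif_pos h]
      have hle : (k/2).toNat ≤ K := by omega
      rw [ih (k/2) hle]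
      by_cases hodd : k % 2 = 1
      · rw [if_pos (show (k % 2 == 1) = true by simp [hodd])]
        have hk' : k.toNat = 2*(k/2).toNat + 1 := by omega
        rw [mpow_sq, hk']
        show matMul (matMul r b) (mpow b (2*(k/2).toNat)) =
          matMul r (matMul b (mpow b (2*(k/2).toNat)))
        rw [matMul_assoc]
      · rw [if_neg (show ¬ ((k % 2 == 1) = true) by simp [hodd])]
        have hk' : k.toNat = 2*(k/2).toNat := by omega
        rw [mpow_sq, hk']
    · rw [powLoop, dif_neg h]
      have h0 : k.toNat = 0 := by omega
      rw [h0]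
      exact (matMul_one r).symm

theorem powLoop_eq (r b : Mat3) (k : Int) : powLoop r b k = matMul r (mpow b k.toNat) :=
  powLoop_eq_aux k.toNat k le_rfl r b

theorem mpow_dot (k : Nat) :
    (mpow matM k).a*4 + (mpow matM k).b*2 + (mpow matM k).c = trib (k+2) ∧
    (mpow matM k).d*4 + (mpow matM k).e*2 + (mpow matM k).f = trib (k+1) ∧
    (mpow matM k).g*4 + (mpow matM k).h*2 + (mpow matM k).i = trib k := by
  induction k with
  | zero => simp [mpow, matI, trib]
  | succ k ih =>
    obtain ⟨h1, h2, h3⟩ := ih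
    simp only [matM] at h1 h2 h3
    have ht : trib (k+1+2) = trib (k+2) + trib (k+1) + trib k := by
      show trib (k+3) = _; rw [trib]
    refine ⟨?_, ?_, ?_⟩ <;> simp only [mpow, matMul, matM]
    · rw [ht]; linarith
    · show _ = trib (k+2); linarith
    · linarith

-- B computes trib (n-1).toNat
theorem alt_eq_trib (n : Int) : stepPerms2_alt n = trib (n-1).toNat := by
  unfold stepPerms2_alt
  rw [show (⟨1,0,0,0,1,0,0,0,1⟩ : Mat3) = matI from rfl,
      show (⟨1,1,1,1,0,0,0,1,0⟩ : Mat3) = matM from rfl,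
      powLoop_eq, one_matMul]
  exact (mpow_dot (n-1).toNat).2.2

def dInit : PySem.Dict Int Int := (((PySem.Dict.empty).insert 0 1).insert 1 2).insert 2 4

def aStep (d : PySem.Dict Int Int) (i : Int) : PySem.Dict Int Int :=
  d.insert i (d.getD (i-1) 0 + d.getD (i-2) 0 + d.getD (i-3) 0)

theorem dInit_get? (j : Int) :
    dInit.get? j = if 0 ≤ j ∧ j ≤ 2 then some (trib j.toNat) else none := by
  unfold dInit
  rw [PySem.Dict.get?_insert, PySem.Dict.get?_insert, PySem.Dict.get?_insert,
      PySem.Dict.get?_empty]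
  by_cases e2 : j = 2
  · subst e2; decide
  by_cases e1 : j = 1
  · subst e1; decide
  by_cases e0 : j = 0
  · subst e0; decide
  rw [if_neg e2, if_neg e1, if_neg e0, if_neg (by omega)]

theorem fold_get? (m : Nat) (j : Int) :
    ((PySem.List.pyRange 3 (3+(m:Int)) 1).foldl aStep dInit).get? j =
      if 0 ≤ j ∧ j ≤ 2 + (m:Int) then some (trib j.toNat) else none := by
  induction m generalizing j with
  | zero =>
    rw [show (3+((0:Nat):Int)) = 3 from rfl, PySem.List.pyRange_one_eq_nil (by omega)]
    simpa using dInit_get? j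
  | succ m ih =>
    have hsplit : PySem.List.pyRange 3 (3+((m+1:Nat):Int)) 1
        = PySem.List.pyRange 3 (3+(m:Int)) 1 ++ [3+(m:Int)] := by
      rw [show (3+((m+1:Nat):Int)) = (3+(m:Int))+1 by push_cast; ring]
      exact PySem.List.pyRange_one_succ_right (by omega)
    rw [hsplit, List.foldl_append, List.foldl_cons, List.foldl_nil]
    set D := (PySem.List.pyRange 3 (3+(m:Int)) 1).foldl aStep dInit with hD
    have hgD : ∀ (x : Int), 0 ≤ x → x ≤ 2 + (m:Int) → D.getD x 0 = trib x.toNat := by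
      intro x h0 h2
      rw [PySem.Dict.getD_eq_get?_getD, ih x]
      simp [h0, h2]
    unfold aStep
    rw [PySem.Dict.get?_insert]
    by_cases hj : j = 3 + (m:Int)
    · subst hj
      rw [if_pos rfl, if_pos (by push_cast; omega)]
      rw [show (3+(m:Int))-1 = 2+(m:Int) by ring, show (3+(m:Int))-2 = 1+(m:Int) by ring,
          show (3+(m:Int))-3 = (m:Int) by ring,
          hgD _ (by omega) (by omega), hgD _ (by omega) (by omega), hgD _ (by omega) (by omega)]
      rw [show ((2:Int)+(m:Int)).toNat = m+2 by omega, show ((1:Int)+(m:Int)).toNat = m+1 by omega,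
          show ((m:Int)).toNat = m by omega, show ((3:Int)+(m:Int)).toNat = m+3 by omega, trib]
    · rw [if_neg hj, ih j]
      by_cases hr : 0 ≤ j ∧ j ≤ 2 + (m:Int)
      · rw [if_pos hr, if_pos (by push_cast; omega)]
      · rw [if_neg hr, if_neg (by push_cast; omega)]

-- A computes trib (n-1).toNat on Pre_
theorem a_eq_trib (n : Int) (hn : 1 ≤ n) : stepPerms2 n = trib (n-1).toNat := by
  unfold stepPerms2
  show ((((PySem.List.pyRange 3 (n+1) 1).foldl aStep dInit)).get? (n-1)).getD 0 = _
  rcases Int.lt_or_le n 3 with h3 | h3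
  · rw [PySem.List.pyRange_one_eq_nil (by omega)]
    simp only [List.foldl_nil]
    rw [dInit_get? (n-1), if_pos ⟨by omega, by omega⟩]
    rfl
  · have hm : n + 1 = 3 + ((n-2).toNat : Int) := by omega
    rw [hm, fold_get? (n-2).toNat (n-1), if_pos ⟨by omega, by omega⟩]
    rfl

-- ===== VERDICT (by name: the statement is the Claim_ definition above) =====
theorem stepPerms2_spec : Claim_equal_stepPerms2 := by
  intro n _ hpre
  show stepPerms2 n = stepPerms2_alt n
  rw [a_eq_trib n hpre, alt_eq_trib]
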